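-- pv_equiv track=rewrite | github.com/lzz989/LLMTrading | llm_trading/signals.py | _max_date_str
-- ===== SOURCE A (Python) =====
-- from typing import Any, Literal
--
-- def _max_date_str(values: list[Any]) -> str | None:
--     """
--     取最大日期字符串（优先假设是 YYYY-MM-DD 这种可字典序比较的格式）。
--     """
--     best = None
--     for v in values:
--         s = str(v or "").strip()
--         if not s:
--             continue
--         if best is None or s > best:
--             best = s
--     return best
-- ===== SOURCE B (Python) =====
-- def _max_date_str(values):
--     cleaned = [s for v in values if (s := str(v or "").strip())]
--     if not cleaned:
--         return None
--     return sorted(cleaned)[-1]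
-- ===== Notes on version B (the rewrite author's own statement) =====
-- stated objective: alternative
-- what changed: Replaces A's running-best single scan with build-the-cleaned-list, sort, and take the last element.
import Mathlib
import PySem

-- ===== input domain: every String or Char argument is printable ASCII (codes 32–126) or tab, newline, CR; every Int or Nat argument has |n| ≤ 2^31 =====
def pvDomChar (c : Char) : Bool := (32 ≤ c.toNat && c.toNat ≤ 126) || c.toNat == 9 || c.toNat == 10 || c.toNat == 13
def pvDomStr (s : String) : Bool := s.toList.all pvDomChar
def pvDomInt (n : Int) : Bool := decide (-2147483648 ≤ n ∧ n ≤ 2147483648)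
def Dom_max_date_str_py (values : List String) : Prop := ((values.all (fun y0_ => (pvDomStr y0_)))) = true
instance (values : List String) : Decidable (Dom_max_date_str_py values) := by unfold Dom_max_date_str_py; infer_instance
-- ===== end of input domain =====

-- B is an alternative decomposition (build cleaned list, sort, take last) of A's running-best scan; same cost class, no speed claim.

-- ===== PORT A =====
-- literal port: running best over the values; for a String argument, `str(v or "")` is `v` itself
def max_date_str_py (values : List String) : Option String :=
  values.foldl
    (fun best v =>
      let s := PySem.Str.strip (if v = "" then "" else v)   -- str(v or "").strip()
      if s = "" then best                                   -- if not s: continue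
      else
        match best with
        | none => some s
        | some b => if b < s then some s else some b)       -- if best is None or s > best
    none

-- ===== PORT B =====
-- cleaned = [s for v in values if (s := str(v or "").strip())]
def pvCleaned (values : List String) : List String :=
  (values.map (fun v => PySem.Str.strip (if v = "" then "" else v))).filter (fun s => s ≠ "")

def max_date_str_py_alt (values : List String) : Option String :=
  let cleaned := pvCleaned values
  if cleaned = [] then none
  else PySem.List.pyGet? (PySem.List.sorted cleaned (fun x => x) false) (-1)

-- ===== PRECONDITION & SPEC =====
def Spec_max_date_str_py (values : List String) (out : Option String) : Prop := out = max_date_str_py_alt values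
instance (values : List String) (out : Option String) : Decidable (Spec_max_date_str_py values out) := by unfold Spec_max_date_str_py; infer_instance

-- ===== CLAIM (what is proved, stated in full; the proofs are below) =====
def Claim_equal_max_date_str_py : Prop := ∀ (values : List String), Dom_max_date_str_py values → Spec_max_date_str_py values (max_date_str_py values)

-- ===== LEMMAS AND PROOFS =====

-- the running-best step, named for the proofs (definitionally the step both ports' folds use)
def pvStep (best : Option String) (s : String) : Option String :=
  match best with
  | none => some s
  | some b => if b < s then some s else some b

theorem A_as_fold (values : List String) :
    max_date_str_py values
      = values.foldl
          (fun acc v =>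
            let s := PySem.Str.strip (if v = "" then "" else v)
            if s = "" then acc else pvStep acc s) none := rfl

-- A's fold over values is the plain pvStep fold over the cleaned list
theorem bridge (values : List String) (acc : Option String) :
    values.foldl
        (fun acc v =>
          let s := PySem.Str.strip (if v = "" then "" else v)
          if s = "" then acc else pvStep acc s) acc
      = (pvCleaned values).foldl pvStep acc := by
  induction values generalizing acc with
  | nil => rfl
  | cons v vs ih =>
      simp only [List.foldl_cons, pvCleaned, List.map_cons, List.filter_cons]
      by_cases h : PySem.Str.strip (if v = "" then "" else v) = ""
      · simp only [h, ne_eq, not_true_eq_false, decide_false]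
        simpa [pvCleaned] using ih acc
      · simp only [ne_eq, h, not_false_eq_true, decide_true]
        simpa [pvCleaned] using ih (pvStep acc (PySem.Str.strip (if v = "" then "" else v)))

-- the fold from some a returns the maximum of a and the list
theorem pvStep_fold_some (t : List String) : ∀ (a : String),
    ∃ m, t.foldl pvStep (some a) = some m ∧ (m = a ∨ m ∈ t) ∧ a ≤ m ∧ ∀ b ∈ t, b ≤ m := by
  induction t with
  | nil => exact fun a => ⟨a, rfl, Or.inl rfl, le_refl a, by simp⟩
  | cons x xs ih =>
      intro a
      have hx : List.foldl pvStep (some a) (x :: xs) = List.foldl pvStep (pvStep (some a) x) xs := rfl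
      by_cases h : a < x
      · obtain ⟨m, hm, hmem, hle, hub⟩ := ih x
        refine ⟨m, ?_, ?_, le_of_lt (lt_of_lt_of_le h hle), ?_⟩
        · rw [hx]; simp only [pvStep, if_pos h]; exact hm
        · rcases hmem with h1 | h1
          · exact Or.inr (by simp [h1])
          · exact Or.inr (by simp [h1])
        · intro b hb
          rcases List.mem_cons.mp hb with rfl | hb
          · exact hle
          · exact hub b hb
      · obtain ⟨m, hm, hmem, hle, hub⟩ := ih a
        refine ⟨m, ?_, ?_, hle, ?_⟩
        · rw [hx]; simp only [pvStep, if_neg h]; exact hm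
        · rcases hmem with h1 | h1
          · exact Or.inl h1
          · exact Or.inr (by simp [h1])
        · intro b hb
          rcases List.mem_cons.mp hb with rfl | hb
          · exact le_trans (not_lt.mp h) hle
          · exact hub b hb

-- the last element of the sorted list is an element and an upper bound
theorem sorted_last_spec (l : List String) (hne : PySem.List.sorted l (fun x => x) false ≠ []) :
    (PySem.List.sorted l (fun x => x) false).getLast hne ∈ l ∧
      ∀ b ∈ l, b ≤ (PySem.List.sorted l (fun x => x) false).getLast hne := by
  have hperm : (PySem.List.sorted l (fun x => x) false).Perm l := PySem.List.sorted_perm ..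
  have hpw : (PySem.List.sorted l (fun x => x) false).Pairwise (fun a b => a ≤ b) :=
    PySem.List.sorted_pairwise ..
  refine ⟨hperm.mem_iff.mp (List.getLast_mem hne), ?_⟩
  intro b hb
  have hb' : b ∈ PySem.List.sorted l (fun x => x) false := hperm.mem_iff.mpr hb
  obtain ⟨i, hi, rfl⟩ := List.getElem_of_mem hb'
  rw [List.getLast_eq_getElem]
  rcases eq_or_lt_of_le (Nat.le_pred_of_lt hi) with he | hlt
  · subst he; exact le_rfl
  · rw [Nat.pred_eq_sub_one] at hlt
    exact List.pairwise_iff_getElem.mp hpw i _ (by omega) (by omega) hlt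

-- ===== VERDICT (by name: the statement is the Claim_ definition above) =====
theorem max_date_str_py_spec : Claim_equal_max_date_str_py := by
  intro values _
  unfold Spec_max_date_str_py max_date_str_py_alt
  rw [A_as_fold, bridge]
  by_cases h : pvCleaned values = []
  · simp [h]
  · rw [if_neg h]
    have hne : PySem.List.sorted (pvCleaned values) (fun x => x) false ≠ [] := by
      simpa [PySem.List.sorted_eq_nil_iff] using h
    rw [PySem.List.pyGet?_neg_one, List.getLast?_eq_some_getLast hne]
    obtain ⟨hgmem, hgub⟩ := sorted_last_spec (pvCleaned values) hne
    obtain ⟨c, t, hct⟩ := List.exists_cons_of_ne_nil h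
    obtain ⟨m, hm, hmem, hle, hub⟩ := pvStep_fold_some t c
    have hfold : List.foldl pvStep none (pvCleaned values) = some m := by
      rw [hct]; exact hm
    rw [hfold]
    have hmub : ∀ b ∈ pvCleaned values, b ≤ m := by
      intro b hb
      rw [hct] at hb
      rcases List.mem_cons.mp hb with rfl | hb
      · exact hle
      · exact hub b hb
    have hmmem : m ∈ pvCleaned values := by
      rw [hct]
      rcases hmem with h1 | h1
      · exact List.mem_cons.mpr (Or.inl h1)
      · exact List.mem_cons.mpr (Or.inr h1)
    congr 1
    exact le_antisymm (hgub m hmmem) (hmub _ hgmem)
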